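-- pv_equiv track=rewrite | github.com/arafMustavi/SimulationModeling | 03 SerialTest.py | groupSequence
-- ===== SOURCE A (Python) =====
-- def groupSequence(lst):
--     res = [[lst[0]]]
--
--     for i in range(1, len(lst)):
--         if lst[i - 1] < lst[i]:
--             res[-1].append(lst[i])
--         else:
--             res.append([lst[i]])
--     return res
-- ===== SOURCE B (Python) =====
-- def groupSequence(lst):
--     n = len(lst)
--     bounds = [0] + [i for i in range(1, n) if not lst[i - 1] < lst[i]] + [n]
--     return [lst[a:b] for a, b in zip(bounds, bounds[1:])]
-- ===== Notes on version B (the rewrite author's own statement) =====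
-- stated objective: alternative
-- what changed: B first computes the list of run-boundary indices in one pass and then emits each run as a slice between adjacent bounds, instead of A's element-by-element append onto the last group of a growing result.
-- outside the precondition, e.g. on groupSequence([]): A raises IndexError, B returns [[]]
import Mathlib
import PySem

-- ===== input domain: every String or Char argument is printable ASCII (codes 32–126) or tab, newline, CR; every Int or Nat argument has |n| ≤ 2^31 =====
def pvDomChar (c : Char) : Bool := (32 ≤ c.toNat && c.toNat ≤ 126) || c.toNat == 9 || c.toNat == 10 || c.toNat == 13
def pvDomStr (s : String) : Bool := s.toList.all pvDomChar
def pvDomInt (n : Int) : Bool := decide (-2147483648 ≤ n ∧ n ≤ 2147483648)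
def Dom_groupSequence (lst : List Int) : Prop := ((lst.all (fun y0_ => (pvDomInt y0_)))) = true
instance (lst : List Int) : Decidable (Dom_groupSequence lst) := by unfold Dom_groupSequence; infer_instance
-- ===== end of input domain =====

-- B replaces A's element-by-element append onto the last group by a boundary-index pass followed
-- by a slicing pass (alternative decomposition, same cost); equivalence is about the return value.


-- ===== PORT A =====
-- res = [[lst[0]]]; for i in range(1, len(lst)): if lst[i-1] < lst[i]: res[-1].append(lst[i]) else: res.append([lst[i]])
-- 'res[-1].append(x)' is 'replace the last group by itself ++ [x]' (res is always nonempty).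
def groupSequence (lst : List Int) : List (List Int) :=
  match PySem.List.pyGet? lst 0 with
  | none => []   -- lst[0] raises IndexError on []: excluded by Pre_groupSequence
  | some x0 =>
    (PySem.List.pyRange 1 (lst.length : Int) 1).foldl
      (fun res i =>
        match PySem.List.pyGet? lst (i - 1), PySem.List.pyGet? lst i with
        | some a, some b => if a < b then res.dropLast ++ [res.getLast! ++ [b]] else res ++ [[b]]
        | _, _ => res)   -- unreachable: i ∈ range(1, len(lst))
      [[x0]]

-- ===== PORT B =====
-- bounds = [0] + [i for i in range(1, n) if not lst[i - 1] < lst[i]] + [n]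
-- return [lst[a:b] for a, b in zip(bounds, bounds[1:])]
-- (the .getD 0 defaults in the filter test are never used: i-1 and i are in range for i in range(1, n))
def groupSequence_alt (lst : List Int) : List (List Int) :=
  let n : Int := (lst.length : Int)
  let bounds : List Int :=
    [0] ++ (PySem.List.pyRange 1 n 1).filter
        (fun i => !decide ((PySem.List.pyGet? lst (i - 1)).getD 0 < (PySem.List.pyGet? lst i).getD 0))
      ++ [n]
  (bounds.zip bounds.tail).map (fun p => PySem.List.slice lst (some p.1) (some p.2))

-- ===== PRECONDITION & SPEC =====
-- A raises IndexError (lst[0]) exactly on the empty list; Pre_ excludes it (B returns [[]] there).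
def Pre_groupSequence (lst : List Int) : Prop := lst ≠ []
instance (lst : List Int) : Decidable (Pre_groupSequence lst) := by unfold Pre_groupSequence; infer_instance
def pvWitness_groupSequence : List Int := [3, 1, 2, 2, 5]

def Spec_groupSequence (lst : List Int) (out : List (List Int)) : Prop := out = groupSequence_alt lst
instance (lst : List Int) (out : List (List Int)) : Decidable (Spec_groupSequence lst out) := by unfold Spec_groupSequence; infer_instance

-- ===== CLAIM (what is proved, stated in full; the proofs are below) =====
def Claim_equal_groupSequence : Prop := ∀ (lst : List Int), Dom_groupSequence lst → Pre_groupSequence lst → Spec_groupSequence lst (groupSequence lst)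

-- ===== LEMMAS AND PROOFS =====

-- adjacent pairs of (l ++ [x]) are those of l plus the closing pair
theorem zip_tail_concat {α : Type} (l : List α) (x : α) (h : l ≠ []) :
    (l ++ [x]).zip (l ++ [x]).tail = l.zip l.tail ++ [(l.getLast h, x)] := by
  induction l with
  | nil => exact absurd rfl h
  | cons a t ih =>
    cases t with
    | nil => simp
    | cons b t' =>
      have := ih (by simp)
      simp only [List.cons_append, List.tail_cons, List.zip_cons_cons] at this ⊢
      rw [this]
      simp [List.getLast_cons]

theorem getLast!_concat' {α : Type} [Inhabited α] (l : List α) (a : α) : (l ++ [a]).getLast! = a := by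
  simp [List.getLast!_eq_getLast?_getD, List.getLast?_append]

-- both components of an adjacent pair are elements of the list
theorem mem_of_mem_zip_tail {α : Type} {l : List α} {p : α × α} (h : p ∈ l.zip l.tail) :
    p.1 ∈ l ∧ p.2 ∈ l := by
  obtain ⟨h1, h2⟩ := List.of_mem_zip (by simpa using h)
  exact ⟨h1, List.mem_of_mem_tail h2⟩

-- indexing into lst ++ [z] below lst.length is indexing into lst
theorem pyGet?_concat_lt (lst : List Int) (z : Int) (j : Int) (h0 : 0 ≤ j) (h1 : j < (lst.length : Int)) :
    PySem.List.pyGet? (lst ++ [z]) j = PySem.List.pyGet? lst j := by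
  rw [PySem.List.pyGet?_of_nonneg _ h0, PySem.List.pyGet?_of_nonneg _ h0]
  rw [List.getElem?_append_left (by omega)]

-- slicing lst ++ [z] with bounds ≤ lst.length is slicing lst
theorem slice_concat_le (lst : List Int) (z : Int) (a b : Int)
    (ha : 0 ≤ a) (hb : 0 ≤ b) (hbn : b ≤ (lst.length : Int)) :
    PySem.List.slice (lst ++ [z]) (some a) (some b) = PySem.List.slice lst (some a) (some b) := by
  rw [PySem.List.slice_toNat _ ha hb, PySem.List.slice_toNat _ ha hb]
  by_cases hab : a.toNat ≤ b.toNat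
  · rw [List.drop_append_of_le_length (by omega),
        List.take_append_of_le_length (l₁ := lst.drop a.toNat) (l₂ := [z])
          (i := b.toNat - a.toNat) (by simp only [List.length_drop]; omega)]
  · rw [Nat.sub_eq_zero_of_le (by omega)]
    simp

-- the closing slice (lst ++ [z])[a : n+1] extends lst[a : n] by z
theorem slice_concat_full (lst : List Int) (z : Int) (a : Int) (ha : 0 ≤ a) (han : a ≤ (lst.length : Int)) :
    PySem.List.slice (lst ++ [z]) (some a) (some ((lst.length : Int) + 1)) =
      PySem.List.slice lst (some a) (some (lst.length : Int)) ++ [z] := by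
  rw [PySem.List.slice_toNat _ ha (by omega), PySem.List.slice_toNat _ ha (by omega)]
  rw [List.drop_append_of_le_length (by omega)]
  rw [List.take_of_length_le (l := lst.drop a.toNat ++ [z])
        (by simp only [List.length_append, List.length_drop, List.length_cons, List.length_nil]; omega),
      List.take_of_length_le (l := lst.drop a.toNat) (by simp only [List.length_drop]; omega)]

-- members of B's bounds list lie in [0, n]
theorem mem_bounds (lst : List Int) (x : Int)
    (h : x ∈ (0 : Int) :: (PySem.List.pyRange 1 (lst.length : Int) 1).filter
        (fun i => !decide ((PySem.List.pyGet? lst (i - 1)).getD 0 < (PySem.List.pyGet? lst i).getD 0))) :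
    0 ≤ x ∧ x ≤ (lst.length : Int) := by
  rcases List.mem_cons.mp h with h0 | hf
  · subst h0; exact ⟨le_refl 0, Int.natCast_nonneg _⟩
  · have := (PySem.List.mem_pyRange_one).mp (List.mem_filter.mp hf).1
    omega

-- one-step unfolding of B on lst ++ [z] (lst nonempty)
theorem altStep (lst : List Int) (z : Int) (h : lst ≠ []) :
    groupSequence_alt (lst ++ [z]) =
      if lst.getLast h < z then
        (groupSequence_alt lst).dropLast ++ [(groupSequence_alt lst).getLast! ++ [z]]
      else groupSequence_alt lst ++ [[z]] := by
  have hn : 1 ≤ (lst.length : Int) := by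
    have := List.length_pos_of_ne_nil h; omega
  set N : Int := (lst.length : Int) with hN
  set P : Int → Bool :=
    (fun i => !decide ((PySem.List.pyGet? lst (i - 1)).getD 0 < (PySem.List.pyGet? lst i).getD 0)) with hP
  set F : List Int := (PySem.List.pyRange 1 N 1).filter P with hF
  -- B on lst
  have hBlst : groupSequence_alt lst =
      ((((0 : Int) :: F).zip ((0 : Int) :: F).tail).map
          (fun p => PySem.List.slice lst (some p.1) (some p.2)))
        ++ [PySem.List.slice lst (some (((0 : Int) :: F).getLast (by simp))) (some N)] := by
    show ((([(0:Int)] ++ F ++ [N]).zip (([(0:Int)] ++ F ++ [N]).tail)).map _) = _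
    rw [show [(0:Int)] ++ F ++ [N] = ((0 : Int) :: F) ++ [N] by simp,
        zip_tail_concat _ _ (by simp), List.map_append]
    simp
  -- length cast and range split for lst ++ [z]
  have hlen : (((lst ++ [z]).length : Nat) : Int) = N + 1 := by simp [hN]
  have hrange : PySem.List.pyRange 1 (N + 1) 1 = PySem.List.pyRange 1 N 1 ++ [N] :=
    PySem.List.pyRange_one_succ_right hn
  -- the filter over the common range is unchanged
  have hfilter : ∀ (Q : Int → Bool), (∀ i, 1 ≤ i → i < N → Q i = P i) →
      (PySem.List.pyRange 1 N 1).filter Q = F := by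
    intro Q hQ
    exact List.filter_congr (fun i hi => by
      have := (PySem.List.mem_pyRange_one).mp hi
      exact hQ i this.1 this.2)
  have hgetlast : PySem.List.pyGet? (lst ++ [z]) (N - 1) = some (lst.getLast h) := by
    rw [pyGet?_concat_lt lst z (N - 1) (by omega) (by omega),
        PySem.List.pyGet?_of_nonneg lst (by omega)]
    have h1 : (N - 1).toNat = lst.length - 1 := by omega
    rw [h1, List.getElem?_eq_getElem (by omega), List.getLast_eq_getElem]
  have hgetz : PySem.List.pyGet? (lst ++ [z]) N = some z := by
    exact PySem.List.pyGet?_append_length lst [] z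
  -- unfold B on lst ++ [z]
  show ((([(0:Int)] ++ ((PySem.List.pyRange 1 (((lst ++ [z]).length : Nat) : Int) 1).filter
        (fun i => !decide ((PySem.List.pyGet? (lst ++ [z]) (i - 1)).getD 0 <
            (PySem.List.pyGet? (lst ++ [z]) i).getD 0))) ++ [(((lst ++ [z]).length : Nat) : Int)]).zip
        _).map _) = _
  rw [hlen, hrange, List.filter_append,
      hfilter _ (fun i h1 h2 => by
        rw [pyGet?_concat_lt lst z (i - 1) (by omega) (by omega),
            pyGet?_concat_lt lst z i (by omega) (by omega)])]
  have hsliceeq : ∀ p ∈ (((0 : Int) :: F).zip ((0 : Int) :: F).tail),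
      PySem.List.slice (lst ++ [z]) (some p.1) (some p.2) =
        PySem.List.slice lst (some p.1) (some p.2) := by
    intro p hp
    obtain ⟨h1, h2⟩ := mem_of_mem_zip_tail hp
    obtain ⟨_, _⟩ := mem_bounds lst p.1 h1
    obtain ⟨_, hb2⟩ := mem_bounds lst p.2 h2
    exact slice_concat_le lst z p.1 p.2 (by omega) (by omega) hb2
  obtain ⟨hL0, hLN⟩ := mem_bounds lst _ (List.getLast_mem (l := (0 : Int) :: F) (by simp))
  by_cases hc : lst.getLast h < z
  · -- run continues: the test at i = N filters N out
    have : (List.filter (fun i => !decide ((PySem.List.pyGet? (lst ++ [z]) (i - 1)).getD 0 <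
        (PySem.List.pyGet? (lst ++ [z]) i).getD 0)) [N]) = [] := by
      simp [hgetlast, hgetz, hc]
    rw [this, if_pos hc, hBlst, List.dropLast_concat, getLast!_concat']
    rw [show [(0:Int)] ++ (F ++ []) ++ [N + 1] = ((0 : Int) :: F) ++ [N + 1] by simp,
        zip_tail_concat _ _ (by simp), List.map_append, List.map_congr_left hsliceeq]
    simp only [List.map_cons, List.map_nil]
    rw [slice_concat_full lst z _ hL0 hLN]
  · -- run breaks: N is a new boundary
    have : (List.filter (fun i => !decide ((PySem.List.pyGet? (lst ++ [z]) (i - 1)).getD 0 <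
        (PySem.List.pyGet? (lst ++ [z]) i).getD 0)) [N]) = [N] := by
      simp [hgetlast, hgetz, hc]
    rw [this, if_neg hc, hBlst]
    rw [show [(0:Int)] ++ (F ++ [N]) ++ [N + 1] = (((0 : Int) :: F) ++ [N]) ++ [N + 1] by simp,
        zip_tail_concat _ _ (by simp), zip_tail_concat _ _ (by simp), List.getLast_concat,
        List.map_append, List.map_append, List.map_congr_left hsliceeq]
    simp only [List.map_cons, List.map_nil, List.append_assoc]
    rw [slice_concat_le lst z _ _ hL0 (by omega) (le_refl N)]
    congr 1
    congr 1
    -- (lst ++ [z])[N : N+1] = [z]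
    rw [PySem.List.slice_toNat _ (by omega) (by omega)]
    have h1 : (N : Int).toNat = lst.length := by omega
    have h2 : (N + 1).toNat = lst.length + 1 := by omega
    rw [h1, h2, List.drop_append_of_le_length (le_refl _)]
    simp

-- one-step unfolding of A on lst ++ [z] (lst nonempty)
theorem aStep (lst : List Int) (z : Int) (h : lst ≠ []) :
    groupSequence (lst ++ [z]) =
      if lst.getLast h < z then
        (groupSequence lst).dropLast ++ [(groupSequence lst).getLast! ++ [z]]
      else groupSequence lst ++ [[z]] := by
  have hn : 1 ≤ (lst.length : Int) := by
    have := List.length_pos_of_ne_nil h; omega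
  set N : Int := (lst.length : Int) with hN
  obtain ⟨x0, hx0⟩ : ∃ x0, PySem.List.pyGet? lst 0 = some x0 := by
    rw [PySem.List.pyGet?_of_nonneg lst (by omega)]
    exact ⟨lst[0], List.getElem?_eq_getElem (by omega)⟩
  have hx0' : PySem.List.pyGet? (lst ++ [z]) 0 = some x0 := by
    rw [pyGet?_concat_lt lst z 0 (by omega) (by omega)]; exact hx0
  have hlen : (((lst ++ [z]).length : Nat) : Int) = N + 1 := by simp [hN]
  have hgetlast : PySem.List.pyGet? (lst ++ [z]) (N - 1) = some (lst.getLast h) := by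
    rw [pyGet?_concat_lt lst z (N - 1) (by omega) (by omega),
        PySem.List.pyGet?_of_nonneg lst (by omega)]
    have h1 : (N - 1).toNat = lst.length - 1 := by omega
    rw [h1, List.getElem?_eq_getElem (by omega), List.getLast_eq_getElem]
  have hgetz : PySem.List.pyGet? (lst ++ [z]) N = some z := by
    exact PySem.List.pyGet?_append_length lst [] z
  have hA : groupSequence lst = (PySem.List.pyRange 1 N 1).foldl
      (fun res i =>
        match PySem.List.pyGet? lst (i - 1), PySem.List.pyGet? lst i with
        | some a, some b => if a < b then res.dropLast ++ [res.getLast! ++ [b]] else res ++ [[b]]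
        | _, _ => res) [[x0]] := by
    conv_lhs => unfold groupSequence
    rw [hx0]
  conv_lhs => unfold groupSequence
  rw [hx0', hlen]
  show ((PySem.List.pyRange 1 (N + 1) 1).foldl
      (fun res i =>
        match PySem.List.pyGet? (lst ++ [z]) (i - 1), PySem.List.pyGet? (lst ++ [z]) i with
        | some a, some b => if a < b then res.dropLast ++ [res.getLast! ++ [b]] else res ++ [[b]]
        | _, _ => res) [[x0]]) = _
  rw [PySem.List.pyRange_one_succ_right hn, List.foldl_append,
      PySem.List.foldl_congr_mem (PySem.List.pyRange 1 N 1) _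
        (fun res i =>
          match PySem.List.pyGet? lst (i - 1), PySem.List.pyGet? lst i with
          | some a, some b => if a < b then res.dropLast ++ [res.getLast! ++ [b]] else res ++ [[b]]
          | _, _ => res) _
        (by
          intro acc i hi
          have := (PySem.List.mem_pyRange_one).mp hi
          rw [pyGet?_concat_lt lst z (i - 1) (by omega) (by omega),
              pyGet?_concat_lt lst z i (by omega) (by omega)]),
      ← hA]
  simp only [List.foldl_cons, List.foldl_nil, hgetlast, hgetz]

theorem base_eq (z : Int) : groupSequence [z] = groupSequence_alt [z] := rfl

theorem main_eq (lst : List Int) (h : lst ≠ []) : groupSequence lst = groupSequence_alt lst := by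
  induction lst using List.reverseRecOn with
  | nil => exact absurd rfl h
  | append_singleton l z ih =>
    by_cases hl : l = []
    · subst hl; exact base_eq z
    · rw [aStep l z hl, altStep l z hl, ih hl]

-- ===== VERDICT (by name: the statement is the Claim_ definition above) =====
theorem groupSequence_spec : Claim_equal_groupSequence := by
  intro lst _ hpre
  exact main_eq lst hpre
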